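-- pv_equiv track=rewrite | github.com/Achraf99Jday/Machile_Learning_Heart_Disease_Detection | projet.py | creeArbre
-- ===== SOURCE A (Python) =====
-- def creeArbre(arcs, racine):
--     """
--     À partir d'une liste d'arcs et d'une racine, renvoie l'arbre orienté depuis
--     cette racine.
--     *les parametres:
--     arcs: liste d'ensembles d'arcs connexes.
--     racine: nom d'un sommet.
--     *le return:
--     l'arbre orienté.
--     """
--     results = []
--     file = [racine]
--     while file != []:
--         sommet = file.pop(0)
--         arcs_copy = arcs.copy()
--         for (u, v, poids) in arcs_copy:
--             if sommet == u:
--                 results.append((u, v))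
--                 arcs.remove((u, v, poids))
--                 file.append(v)
--             elif sommet == v:
--                 results.append((v, u))
--                 arcs.remove((u, v, poids))
--                 file.append(u)
--     return results
-- ===== SOURCE B (Python) =====
-- # Single-pass BFS over an adjacency index built once, with a used-edge-id set,
-- # instead of A's rescans of the whole (mutated) edge list per dequeued vertex.
-- # Note: A empties `arcs` of reachable edges in place; B leaves `arcs` untouched
-- # (the equivalence is about the return value).
-- def creeArbre(arcs, racine):
--     adj = {}
--     for i, (u, v, p) in enumerate(arcs):
--         if u in adj:
--             adj[u].append((i, v))
--         else:
--             adj[u] = [(i, v)]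
--         if v != u:
--             if v in adj:
--                 adj[v].append((i, u))
--             else:
--                 adj[v] = [(i, u)]
--     used = set()
--     results = []
--     queue = [racine]
--     head = 0
--     while head < len(queue):
--         s = queue[head]
--         head += 1
--         for (i, w) in adj.get(s, []):
--             if i not in used:
--                 used.add(i)
--                 results.append((s, w))
--                 queue.append(w)
--     return results
-- ===== Notes on version B (the rewrite author's own statement) =====
-- stated objective: faster
-- what changed: Replaces A's per-vertex rescan of the whole mutated edge list (with O(E) list.remove calls) by a one-pass build of an index-ordered adjacency dictionary plus a used-edge-id set and a head-indexed queue, so each edge is touched O(1) times.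
import Mathlib
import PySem

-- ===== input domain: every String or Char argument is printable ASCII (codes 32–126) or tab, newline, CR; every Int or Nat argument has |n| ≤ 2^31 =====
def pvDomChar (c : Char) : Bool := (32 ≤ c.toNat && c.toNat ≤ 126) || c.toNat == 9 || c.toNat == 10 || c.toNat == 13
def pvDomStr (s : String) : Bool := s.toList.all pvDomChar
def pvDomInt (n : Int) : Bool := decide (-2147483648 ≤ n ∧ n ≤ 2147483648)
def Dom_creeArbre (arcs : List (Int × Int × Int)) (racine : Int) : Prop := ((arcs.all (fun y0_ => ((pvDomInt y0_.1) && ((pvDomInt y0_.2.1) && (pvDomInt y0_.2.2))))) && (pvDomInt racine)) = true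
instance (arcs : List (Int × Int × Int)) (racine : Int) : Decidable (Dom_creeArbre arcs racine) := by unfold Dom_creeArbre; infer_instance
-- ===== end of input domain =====

-- B replaces A's per-vertex rescans of the mutated edge list by one adjacency index + a
-- used-edge-id set (objective: faster). A empties `arcs` in place; B does not mutate it —
-- the equivalence proved here is about the return value only.

-- ===== PORT A =====
-- inner `for (u, v, poids) in arcs_copy` loop of A; state = (results, arcs, file).
-- `arcs.remove(...)` is PySem.List.remove?; the `none` branch is Python's ValueError,
-- unreachable here because the scanned copy is always a sublist of the current `arcs`.
def pvInnerA (sommet : Int) : List (Int × Int × Int) → List (Int × Int) → List (Int × Int × Int) → List Int →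
    List (Int × Int) × List (Int × Int × Int) × List Int
  | [], results, arcs, file => (results, arcs, file)
  | (u, v, poids) :: rest, results, arcs, file =>
    if sommet = u then
      match PySem.List.remove? arcs (u, v, poids) with
      | some arcs' => pvInnerA sommet rest (results ++ [(u, v)]) arcs' (file ++ [v])
      | none => pvInnerA sommet rest (results ++ [(u, v)]) arcs file
    else if sommet = v then
      match PySem.List.remove? arcs (u, v, poids) with
      | some arcs' => pvInnerA sommet rest (results ++ [(v, u)]) arcs' (file ++ [u])
      | none => pvInnerA sommet rest (results ++ [(v, u)]) arcs file
    else
      pvInnerA sommet rest results arcs file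

-- termination lemma for the outer while-loop (cited by pvLoopA's decreasing_by)
theorem pvRemove_len {α : Type} [BEq α] [LawfulBEq α] {arcs arcs' : List α} {e : α}
    (h : PySem.List.remove? arcs e = some arcs') : arcs'.length + 1 = arcs.length := by
  have hmem : e ∈ arcs := by
    by_contra hn
    rw [(PySem.List.remove?_eq_none_iff arcs _).2 hn] at h; cases h
  rw [PySem.List.remove?_eq_some_erase arcs _ hmem] at h
  have h1 := List.length_erase_of_mem hmem
  have h2 : 0 < arcs.length := List.length_pos_of_mem hmem
  cases h
  omega

theorem pvInnerA_measure (sommet : Int) (copy : List (Int × Int × Int)) (results : List (Int × Int))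
    (arcs : List (Int × Int × Int)) (file : List Int) :
    2 * (pvInnerA sommet copy results arcs file).2.1.length + (pvInnerA sommet copy results arcs file).2.2.length ≤
      2 * arcs.length + file.length := by
  induction copy generalizing results arcs file with
  | nil => simp [pvInnerA]
  | cons e rest ih =>
    obtain ⟨u, v, poids⟩ := e
    simp only [pvInnerA]
    split
    · rcases h : PySem.List.remove? arcs (u, v, poids) with _ | arcs'
      · simpa using (ih (results ++ [(u, v)]) arcs file)
      · have hlen := pvRemove_len h
        have hle := ih (results ++ [(u, v)]) arcs' (file ++ [v])
        simp only [List.length_append, List.length_cons, List.length_nil] at hle ⊢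
        omega
    · split
      · rcases h : PySem.List.remove? arcs (u, v, poids) with _ | arcs'
        · simpa using (ih (results ++ [(v, u)]) arcs file)
        · have hlen := pvRemove_len h
          have hle := ih (results ++ [(v, u)]) arcs' (file ++ [u])
          simp only [List.length_append, List.length_cons, List.length_nil] at hle ⊢
          omega
      · simpa using (ih results arcs file)

-- the outer `while file != []` loop of A
def pvLoopA (results : List (Int × Int)) (arcs : List (Int × Int × Int)) (file : List Int) : List (Int × Int) :=
  match file with
  | [] => results
  | sommet :: rest =>
    let st := pvInnerA sommet arcs results arcs rest
    pvLoopA st.1 st.2.1 st.2.2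
termination_by 2 * arcs.length + file.length
decreasing_by
  have := pvInnerA_measure sommet arcs results arcs rest
  simp only [List.length_cons]
  omega

def creeArbre (arcs : List (Int × Int × Int)) (racine : Int) : List (Int × Int) :=
  pvLoopA [] arcs [racine]

-- ===== PORT B =====
-- one step of Source B's adjacency-building loop (`for i, (u, v, p) in enumerate(arcs)`)
def pvAdjStep (d : PySem.Dict Int (List (Int × Int))) (i : Int) (e : Int × Int × Int) :
    PySem.Dict Int (List (Int × Int)) :=
  let d1 := if d.contains e.1 then d.insert e.1 (d.getD e.1 [] ++ [(i, e.2.1)]) else d.insert e.1 [(i, e.2.1)]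
  if e.2.1 ≠ e.1 then
    if d1.contains e.2.1 then d1.insert e.2.1 (d1.getD e.2.1 [] ++ [(i, e.1)]) else d1.insert e.2.1 [(i, e.1)]
  else d1

def pvBuildAdj : Int → List (Int × Int × Int) → PySem.Dict Int (List (Int × Int)) → PySem.Dict Int (List (Int × Int))
  | _, [], d => d
  | i, e :: rest, d => pvBuildAdj (i + 1) rest (pvAdjStep d i e)

-- inner `for (i, w) in adj.get(s, [])` loop of Source B; state = (used, results, queue-tail)
def pvScanB (s : Int) : List (Int × Int) → List Int → List (Int × Int) → List Int →
    List Int × List (Int × Int) × List Int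
  | [], used, results, queue => (used, results, queue)
  | (i, w) :: rest, used, results, queue =>
    if PySem.Set.contains used i then pvScanB s rest used results queue
    else pvScanB s rest (PySem.Set.add used i) (results ++ [(s, w)]) (queue ++ [w])

-- Source B's `while head < len(queue)` over a head-indexed list is a dequeue loop; ported as a
-- pop-front list with a fuel bound (a totality guard only; 2*len(arcs)+1 steps always suffice,
-- which the equivalence proof below establishes).
def pvLoopB (adj : PySem.Dict Int (List (Int × Int))) :
    Nat → List Int → List (Int × Int) → List Int → List (Int × Int)
  | _, _, results, [] => results
  | 0, _, results, _ :: _ => results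
  | fuel + 1, used, results, s :: rest =>
    let st := pvScanB s (adj.getD s []) used results rest
    pvLoopB adj fuel st.1 st.2.1 st.2.2

def creeArbre_alt (arcs : List (Int × Int × Int)) (racine : Int) : List (Int × Int) :=
  pvLoopB (pvBuildAdj 0 arcs PySem.Dict.empty) (2 * arcs.length + 1) [] [] [racine]

-- ===== PRECONDITION & SPEC =====
def Spec_creeArbre (arcs : List (Int × Int × Int)) (racine : Int) (out : List (Int × Int)) : Prop := out = creeArbre_alt arcs racine
instance (arcs : List (Int × Int × Int)) (racine : Int) (out : List (Int × Int)) : Decidable (Spec_creeArbre arcs racine out) := by unfold Spec_creeArbre; infer_instance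

-- ===== CLAIM (what is proved, stated in full; the proofs are below) =====
def Claim_equal_creeArbre : Prop := ∀ (arcs : List (Int × Int × Int)) (racine : Int), Dom_creeArbre arcs racine → Spec_creeArbre arcs racine (creeArbre arcs racine)

-- ===== LEMMAS AND PROOFS =====

-- `e` is incident to vertex `s`
def pvInc (s : Int) (e : Int × Int × Int) : Bool := decide (s = e.1 ∨ s = e.2.1)
-- the other endpoint, as pushed on the queue
def pvPush (s : Int) (e : Int × Int × Int) : Int := if s = e.1 then e.2.1 else e.1
-- the oriented edge emitted
def pvOut (s : Int) (e : Int × Int × Int) : Int × Int := (s, pvPush s e)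
-- edges of `arcs` whose index is not yet used
def pvRem (arcs : List (Int × Int × Int)) (used : List Int) : List (Int × Int × Int) :=
  ((PySem.List.enumerate arcs 0).filter (fun q => !(PySem.Set.contains used q.1))).map (·.2)

theorem pvInnerA_spec (s : Int) (copy : List (Int × Int × Int)) :
    ∀ (results : List (Int × Int)) (arcs : List (Int × Int × Int)) (file : List Int),
    copy.Sublist arcs →
    pvInnerA s copy results arcs file =
      (results ++ (copy.filter (pvInc s)).map (pvOut s),
       (copy.filter (pvInc s)).foldl (fun acc e => acc.erase e) arcs,
       file ++ (copy.filter (pvInc s)).map (pvPush s)) := by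
  induction copy with
  | nil => intro results arcs file _; simp [pvInnerA]
  | cons e rest ih =>
    intro results arcs file h
    obtain ⟨u, v, poids⟩ := e
    have hmem : (u, v, poids) ∈ arcs := h.subset List.mem_cons_self
    have hrest : rest.Sublist (arcs.erase (u, v, poids)) := by
      have := List.Sublist.erase (u, v, poids) h
      rwa [List.erase_cons_head] at this
    simp only [pvInnerA]
    by_cases hu : s = u
    · subst hu
      rw [if_pos rfl, PySem.List.remove?_eq_some_erase arcs _ hmem]
      dsimp only
      rw [ih (results ++ [(s, v)]) (arcs.erase (s, v, poids)) (file ++ [v]) hrest]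
      have hinc : pvInc s (s, v, poids) = true := by simp [pvInc]
      simp [hinc, pvOut, pvPush]
    · rw [if_neg hu]
      by_cases hv : s = v
      · subst hv
        rw [if_pos rfl, PySem.List.remove?_eq_some_erase arcs _ hmem]
        dsimp only
        rw [ih (results ++ [(s, u)]) (arcs.erase (u, s, poids)) (file ++ [u]) hrest]
        have hinc : pvInc s (u, s, poids) = true := by simp [pvInc]
        simp [hinc, pvOut, pvPush, hu]
      · rw [if_neg hv]
        rw [ih results arcs file ((List.sublist_cons_self _ _).trans h)]
        have hinc : pvInc s (u, v, poids) = false := by simp [pvInc, hu, hv]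
        simp [hinc]

theorem pvEraseL_filter {α : Type} [BEq α] [LawfulBEq α] (l : List α) (p : α → Bool) :
    (l.filter p).foldl (fun acc e => acc.erase e) l = l.filter (fun e => !(p e)) := by
  induction l with
  | nil => simp
  | cons h t ih =>
    by_cases hp : p h
    · simp only [List.filter_cons, hp, if_pos, List.foldl_cons]
      rw [List.erase_cons_head]
      simpa [hp] using ih
    · have hcomm : ∀ (es : List α) (t' : List α), (∀ e ∈ es, e ≠ h) →
          es.foldl (fun acc e => acc.erase e) (h :: t') = h :: es.foldl (fun acc e => acc.erase e) t' := by
        intro es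
        induction es with
        | nil => intro t' _; simp
        | cons e es' ihe =>
          intro t' hne
          simp only [List.foldl_cons]
          rw [List.erase_cons_tail (by simp; exact fun hh => (hne e List.mem_cons_self) hh.symm)]
          exact ihe _ (fun x hx => hne x (List.mem_cons_of_mem _ hx))
      have hne : ∀ e ∈ t.filter p, e ≠ h := by
        intro e he hcontra
        have := List.of_mem_filter he
        rw [hcontra] at this
        simp [hp] at this
      simp only [List.filter_cons, hp]
      simp only [Bool.false_eq_true, if_false, Bool.not_false, if_true]
      rw [hcomm _ t hne, ih]

theorem pvAdjStep_getD (d : PySem.Dict Int (List (Int × Int))) (i0 : Int) (e : Int × Int × Int) (s : Int) :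
    (pvAdjStep d i0 e).getD s [] = d.getD s [] ++ (if pvInc s e then [(i0, pvPush s e)] else []) := by
  obtain ⟨u, v, p⟩ := e
  have hbr : ∀ (d' : PySem.Dict Int (List (Int × Int))) (k : Int) (x : Int × Int),
      (if d'.contains k then d'.insert k (d'.getD k [] ++ [x]) else d'.insert k [x]) =
        d'.insert k (d'.getD k [] ++ [x]) := by
    intro d' k x
    by_cases h : d'.contains k
    · simp [h]
    · rw [if_neg (by simp [h]), PySem.Dict.getD_of_not_contains d' [] (by simp [h])]
      simp
  show (let d1 := if d.contains u then d.insert u (d.getD u [] ++ [(i0, v)]) else d.insert u [(i0, v)];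
        if v ≠ u then
          if d1.contains v then d1.insert v (d1.getD v [] ++ [(i0, u)]) else d1.insert v [(i0, u)]
        else d1).getD s [] = _
  simp only [hbr]
  by_cases hvu : v = u
  · rw [if_neg (by simp [hvu])]
    by_cases hs : s = u
    · simp [hs, hvu, pvInc, pvPush]
    · simp [PySem.Dict.getD_insert, hs, hvu, pvInc, Ne.symm]
  · rw [if_pos hvu]
    by_cases hsv : s = v
    · have hsu : s ≠ u := by rw [hsv]; exact hvu
      simp [PySem.Dict.getD_insert, hsv, hvu, pvInc, pvPush]
    · by_cases hsu : s = u
      · simp [PySem.Dict.getD_insert, hsu, Ne.symm hvu, pvInc, pvPush]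
      · simp [PySem.Dict.getD_insert, hsv, hsu, pvInc]

theorem pvAdj_getD (l : List (Int × Int × Int)) :
    ∀ (i0 : Int) (d : PySem.Dict Int (List (Int × Int))) (s : Int),
    (pvBuildAdj i0 l d).getD s [] =
      d.getD s [] ++ ((PySem.List.enumerate l i0).filter (fun q => pvInc s q.2)).map (fun q => (q.1, pvPush s q.2)) := by
  induction l with
  | nil => intro i0 d s; simp [pvBuildAdj, PySem.List.enumerate_nil]
  | cons e rest ih =>
    intro i0 d s
    show (pvBuildAdj (i0 + 1) rest (pvAdjStep d i0 e)).getD s [] = _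
    rw [ih (i0 + 1) (pvAdjStep d i0 e) s, pvAdjStep_getD]
    rw [PySem.List.enumerate_cons]
    by_cases hinc : pvInc s e = true
    · simp [hinc]
    · simp [hinc]

theorem pvScanB_spec (s : Int) (L : List (Int × Int)) :
    ∀ (used : List Int) (results : List (Int × Int)) (queue : List Int),
    (L.map (·.1)).Nodup →
    pvScanB s L used results queue =
      (used ++ (L.filter (fun q => !(PySem.Set.contains used q.1))).map (·.1),
       results ++ (L.filter (fun q => !(PySem.Set.contains used q.1))).map (fun q => (s, q.2)),
       queue ++ (L.filter (fun q => !(PySem.Set.contains used q.1))).map (·.2)) := by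
  induction L with
  | nil => intro used results queue _; simp [pvScanB]
  | cons e rest ih =>
    intro used results queue hnd
    obtain ⟨i, w⟩ := e
    simp only [List.map_cons, List.nodup_cons] at hnd
    obtain ⟨hni, hnd'⟩ := hnd
    simp only [pvScanB]
    by_cases hc : PySem.Set.contains used i = true
    · rw [if_pos hc, ih used results queue hnd']
      have hm : i ∈ used := by simpa [PySem.Set.contains] using hc
      simp [hm]
    · rw [if_neg hc]
      have hadd : PySem.Set.add used i = used ++ [i] := by
        rw [PySem.Set.add, if_neg hc]
      rw [hadd, ih (used ++ [i]) (results ++ [(s, w)]) (queue ++ [w]) hnd']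
      have hfc : rest.filter (fun q => !(PySem.Set.contains (used ++ [i]) q.1)) =
          rest.filter (fun q => !(PySem.Set.contains used q.1)) := by
        apply List.filter_congr
        intro q hq
        have hqi : q.1 ≠ i := by
          intro hcontra
          exact hni (hcontra ▸ List.mem_map_of_mem hq)
        simp [PySem.Set.contains, hqi]
      rw [hfc]
      have hm : i ∉ used := fun h => hc (by simp [PySem.Set.contains, h])
      simp [hm, List.append_assoc]

-- on a list with strictly increasing first components, the first component determines the pair
theorem pvPairwise_fst_inj {α : Type} {l : List (Int × α)} (h : l.Pairwise (fun p q => p.1 < q.1)) :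
    ∀ q ∈ l, ∀ q' ∈ l, q.1 = q'.1 → q = q' := by
  intro q hq q' hq' heq
  have hnd : (l.map (fun x => x.1)).Nodup :=
    List.pairwise_map.2 (h.imp fun hlt => ne_of_lt hlt)
  exact List.inj_on_of_nodup_map hnd hq hq' heq

theorem pvSim (arcs : List (Int × Int × Int)) :
    ∀ (fuel : Nat) (used : List Int) (results : List (Int × Int)) (file : List Int),
    2 * (pvRem arcs used).length + file.length ≤ fuel →
    pvLoopB (pvBuildAdj 0 arcs PySem.Dict.empty) fuel used results file =
      pvLoopA results (pvRem arcs used) file := by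
  intro fuel
  induction fuel with
  | zero =>
    intro used results file hle
    cases file with
    | nil => simp [pvLoopB, pvLoopA]
    | cons s rest => simp at hle
  | succ f ih =>
    intro used results file hle
    cases file with
    | nil => simp [pvLoopB, pvLoopA]
    | cons s rest =>
      have hEpw : (PySem.List.enumerate arcs 0).Pairwise (fun p q => p.1 < q.1) :=
        PySem.List.pairwise_lt_enumerate arcs 0
      -- the adjacency entry for s
      have hL : (pvBuildAdj 0 arcs PySem.Dict.empty).getD s [] =
          ((PySem.List.enumerate arcs 0).filter (fun q => pvInc s q.2)).map (fun q => (q.1, pvPush s q.2)) := by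
        rw [pvAdj_getD arcs 0 PySem.Dict.empty s]
        simp [PySem.Dict.getD_empty]
      have hFpw : ((PySem.List.enumerate arcs 0).filter (fun q => pvInc s q.2)).Pairwise (fun p q => p.1 < q.1) :=
        hEpw.filter _
      have hnd : (((pvBuildAdj 0 arcs PySem.Dict.empty).getD s []).map (·.1)).Nodup := by
        rw [hL, List.map_map]
        exact (List.pairwise_map.2 (hFpw.imp (fun h => ne_of_lt h)))
      -- one step on the B side
      show (let st := pvScanB s ((pvBuildAdj 0 arcs PySem.Dict.empty).getD s []) used results rest
            pvLoopB (pvBuildAdj 0 arcs PySem.Dict.empty) f st.1 st.2.1 st.2.2) = _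
      rw [pvScanB_spec s _ used results rest hnd]
      -- one step on the A side
      rw [show pvLoopA results (pvRem arcs used) (s :: rest) =
            (let st := pvInnerA s (pvRem arcs used) results (pvRem arcs used) rest
             pvLoopA st.1 st.2.1 st.2.2) from by rw [pvLoopA]]
      rw [pvInnerA_spec s (pvRem arcs used) results (pvRem arcs used) rest (List.Sublist.refl _)]
      dsimp only
      rw [pvEraseL_filter]
      -- align the three state components
      set E := PySem.List.enumerate arcs 0 with hE
      have hfm :
          ((E.filter (fun q => pvInc s q.2)).map (fun q => ((q.1 : Int), pvPush s q.2))).filter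
              (fun q => !(PySem.Set.contains used q.1)) =
            ((E.filter (fun q => pvInc s q.2)).filter (fun q => !(PySem.Set.contains used q.1))).map
              (fun q => (q.1, pvPush s q.2)) := by
        rw [List.filter_map]
        rfl
      have hRfilter : (pvRem arcs used).filter (pvInc s) =
          ((E.filter (fun q => pvInc s q.2)).filter (fun q => !(PySem.Set.contains used q.1))).map (·.2) := by
        unfold pvRem
        rw [List.filter_map, List.filter_filter, List.filter_filter]
        congr 1
        apply List.filter_congr
        intro q _
        simp [Function.comp, Bool.and_comm]
      rw [hL, hfm]
      -- the new used set still filters to the right remaining-arcs list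
      have hrem : pvRem arcs (used ++ (((E.filter (fun q => pvInc s q.2)).filter
              (fun q => !(PySem.Set.contains used q.1))).map (fun q => (q.1, pvPush s q.2))).map (·.1)) =
          (pvRem arcs used).filter (fun e => !(pvInc s e)) := by
        unfold pvRem
        rw [List.map_map, List.filter_map]
        conv_rhs => rw [List.filter_filter]
        congr 1
        apply List.filter_congr
        intro q hq
        by_cases hu : q.1 ∈ used
        · simp [PySem.Set.contains, hu]
        · by_cases hi : pvInc s q.2 = true
          · simp [PySem.Set.contains, Function.comp, hu, hi]
            exact ⟨q.2.1, q.2.2.1, q.2.2.2, hq, hi⟩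
          · simp [PySem.Set.contains, Function.comp, hu, hi]
            intro x x1 x2 hmemE
            have heq : (q.1, x, x1, x2) = q := pvPairwise_fst_inj hEpw _ hmemE q hq rfl
            have h2 : (x, x1, x2) = q.2 := congrArg Prod.snd heq
            rw [h2]
            exact Bool.eq_false_iff.mpr hi
      -- fuel bound for the induction hypothesis
      have hlen1 : ((pvRem arcs used).filter (pvInc s)).length +
          ((pvRem arcs used).filter (fun e => !(pvInc s e))).length = (pvRem arcs used).length :=
        (List.length_eq_length_filter_add (pvInc s)).symm
      have hle' : 2 * (pvRem arcs (used ++ (((E.filter (fun q => pvInc s q.2)).filter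
              (fun q => !(PySem.Set.contains used q.1))).map (fun q => (q.1, pvPush s q.2))).map (·.1))).length +
          (rest ++ ((((E.filter (fun q => pvInc s q.2)).filter
              (fun q => !(PySem.Set.contains used q.1))).map (fun q => (q.1, pvPush s q.2))).map (·.2))).length ≤ f := by
        rw [hrem]
        have h2 := congrArg List.length hRfilter
        simp only [List.length_map] at h2
        simp only [List.length_append, List.length_map, List.length_cons] at hle ⊢
        omega
      rw [ih _ _ _ hle']
      rw [hrem, hRfilter]
      simp only [List.map_map]
      rfl

-- ===== VERDICT (by name: the statement is the Claim_ definition above) =====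
theorem creeArbre_spec : Claim_equal_creeArbre := by
  intro arcs racine _
  unfold Spec_creeArbre creeArbre creeArbre_alt
  have h0 : pvRem arcs [] = arcs := by
    simp [pvRem, PySem.Set.contains, List.filter_true, PySem.List.map_snd_enumerate]
  rw [pvSim arcs (2 * arcs.length + 1) [] [] [racine] (by simp [h0])]
  rw [h0]
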